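-- pv_equiv track=rewrite | github.com/KirollosRafat/HackerRank_Problem-Words_Score | Words_Score.py | solve
-- ===== SOURCE A (Python) =====
-- vowels = ["a","e","i","o","u","y"] ## Vowels We looking for in a each single word
--
-- def solve(List):
--     words_score = 0 # The total score of the input
--     for word in List : # loop through the list and get every word
--         vowel_count = 0
--         for char in word: # loop through each word character by character
--             i = word.index(char) # get the index of that character
--             if word[i] in vowels: # check if that caharacter in my vowels list...if it's a vowel then increment the vowel_count by one
--                 vowel_count += 1
--
--         if vowel_count % 2 == 0: # if the vowel_count is even (the word has a even number of vowels)
--             words_score += 2 # increment by two as its score should be 2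
--         else:
--             words_score += 1 # otherwise the score of the word should be one
--
--     return(words_score)
-- ===== SOURCE B (Python) =====
-- vowels = ["a","e","i","o","u","y"]
--
-- def solve(List):
--     total = 0
--     for word in List:
--         vowel_count = sum(word.count(v) for v in vowels)
--         total += 2 if vowel_count % 2 == 0 else 1
--     return total
-- ===== Notes on version B (the rewrite author's own statement) =====
-- stated objective: simpler
-- what changed: B flips the loop nesting: instead of scanning each word character by character with a redundant word.index lookup and a membership test, it scans the word once per vowel with str.count and sums the six counts; the parity rule then gives the word's score.
import Mathlib
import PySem

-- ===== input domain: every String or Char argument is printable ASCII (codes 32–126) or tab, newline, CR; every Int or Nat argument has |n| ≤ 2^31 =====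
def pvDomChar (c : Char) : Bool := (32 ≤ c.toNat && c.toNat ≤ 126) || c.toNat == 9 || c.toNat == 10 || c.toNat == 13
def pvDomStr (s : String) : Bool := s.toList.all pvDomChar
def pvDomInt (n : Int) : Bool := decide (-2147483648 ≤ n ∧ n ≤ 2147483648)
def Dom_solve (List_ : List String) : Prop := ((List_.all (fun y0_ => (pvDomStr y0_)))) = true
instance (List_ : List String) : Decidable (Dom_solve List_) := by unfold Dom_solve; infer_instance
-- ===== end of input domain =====

-- B replaces A's per-character loop (with its redundant word.index lookup) by one str.count scan
-- per vowel, summing the six counts; objective: simpler.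

-- ===== PORT A =====
def vowelsA : List Char := ['a', 'e', 'i', 'o', 'u', 'y']

-- Python's `for char in word` yields 1-char strings and `word.index(char)` is their first
-- occurrence; on single characters this is exactly PySem.List.index? on the code points.
def solve (List_ : List String) : Int :=
  List_.foldl (fun words_score word =>
    let vowel_count : Int :=
      word.toList.foldl (fun vowel_count char =>
        match PySem.List.index? word.toList char with  -- i = word.index(char); cannot raise: char ∈ word
        | some i =>
          match PySem.Str.pyGet? word (i : Int) with    -- word[i]
          | some c => if c ∈ vowelsA then vowel_count + 1 else vowel_count
          | none => vowel_count                          -- unreachable: i is a valid index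
        | none => vowel_count) 0
    if vowel_count % 2 == 0 then words_score + 2 else words_score + 1) 0

-- ===== PORT B =====
def vowelsB : List Char := ['a', 'e', 'i', 'o', 'u', 'y']

-- word.count(v) for a 1-char string v is exactly the count of that code point.
def solve_alt (List_ : List String) : Int :=
  List_.foldl (fun total word =>
    let vowel_count : Int := vowelsB.foldl (fun s v => s + (word.toList.count v : Int)) 0
    total + (if vowel_count % 2 == 0 then 2 else 1)) 0

-- ===== PRECONDITION & SPEC =====
def Spec_solve (List_ : List String) (out : Int) : Prop := out = solve_alt List_
instance (List_ : List String) (out : Int) : Decidable (Spec_solve List_ out) := by unfold Spec_solve; infer_instance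

-- ===== CLAIM (what is proved, stated in full; the proofs are below) =====
def Claim_equal_solve : Prop := ∀ (List_ : List String), Dom_solve List_ → Spec_solve List_ (solve List_)

-- ===== LEMMAS AND PROOFS =====

-- A's inner body simplifies on every character of the word: the index lookup returns the char itself,
-- so the loop counts the characters that are vowels.
lemma innerA_eq (w : List Char) :
    w.foldl (fun vowel_count char =>
      match PySem.List.index? w char with
      | some i =>
        match PySem.List.pyGet? w (i : Int) with
        | some c => if c ∈ vowelsA then vowel_count + 1 else vowel_count
        | none => vowel_count
      | none => vowel_count) (0 : Int)
    = (w.countP (· ∈ vowelsA) : Int) := by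
  have h := PySem.List.foldl_congr_mem' (l := w) (init := (0 : Int))
    (f := fun vowel_count char =>
      match PySem.List.index? w char with
      | some i =>
        match PySem.List.pyGet? w (i : Int) with
        | some c => if c ∈ vowelsA then vowel_count + 1 else vowel_count
        | none => vowel_count
      | none => vowel_count)
    (g := fun vowel_count char => if char ∈ vowelsA then vowel_count + 1 else vowel_count)
    (by
      intro x hx acc
      obtain ⟨k, hk⟩ := Option.isSome_iff_exists.mp ((PySem.List.index?_isSome_iff w x).mpr hx)
      obtain ⟨hlt, hx', -⟩ := PySem.List.getElem_of_index?_eq_some hk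
      simp only [hk, PySem.List.pyGet?_natCast, List.getElem?_eq_getElem hlt, hx'])
  rw [h, PySem.List.foldl_ite_add_one]
  simp

-- The per-vowel counts of B sum to the same count of vowel characters (vowelsB has no duplicates).
lemma sum_counts (w : List Char) :
    w.count 'a' + w.count 'e' + w.count 'i' + w.count 'o' + w.count 'u' + w.count 'y'
      = w.countP (· ∈ vowelsB) := by
  induction w with
  | nil => rfl
  | cons c w ih =>
    rw [List.countP_cons]
    simp only [List.count_cons]
    by_cases h : c ∈ vowelsB
    · have hd : decide (c ∈ vowelsB) = true := by simpa using h
      rw [hd]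
      simp only [vowelsB, List.mem_cons, List.not_mem_nil, or_false] at h
      rcases h with rfl | rfl | rfl | rfl | rfl | rfl <;> simp <;> omega
    · have hd : decide (c ∈ vowelsB) = false := by simpa using h
      simp only [vowelsB, List.mem_cons, List.not_mem_nil, or_false, not_or] at h
      obtain ⟨h1, h2, h3, h4, h5, h6⟩ := h
      rw [hd]
      simp only [beq_iff_eq, if_neg h1, if_neg h2, if_neg h3, if_neg h4, if_neg h5, if_neg h6,
        Bool.false_eq_true, if_false]
      omega

lemma innerB_eq (w : List Char) :
    vowelsB.foldl (fun s v => s + (w.count v : Int)) 0 = (w.countP (· ∈ vowelsB) : Int) := by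
  have h := sum_counts w
  simp only [vowelsB] at h ⊢
  simp only [List.foldl_cons, List.foldl_nil]
  omega

lemma body_eq :
    (fun (words_score : Int) (word : String) =>
      let vowel_count : Int :=
        word.toList.foldl (fun vowel_count char =>
          match PySem.List.index? word.toList char with
          | some i =>
            match PySem.Str.pyGet? word (i : Int) with
            | some c => if c ∈ vowelsA then vowel_count + 1 else vowel_count
            | none => vowel_count
          | none => vowel_count) 0
      if vowel_count % 2 == 0 then words_score + 2 else words_score + 1)
    = (fun (total : Int) (word : String) =>
        let vowel_count : Int := vowelsB.foldl (fun s v => s + (word.toList.count v : Int)) 0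
        total + (if vowel_count % 2 == 0 then 2 else 1)) := by
  funext acc word
  have hA : word.toList.foldl (fun vowel_count char =>
      match PySem.List.index? word.toList char with
      | some i =>
        match PySem.Str.pyGet? word (i : Int) with
        | some c => if c ∈ vowelsA then vowel_count + 1 else vowel_count
        | none => vowel_count
      | none => vowel_count) (0 : Int) = (word.toList.countP (· ∈ vowelsA) : Int) := by
    rw [← innerA_eq word.toList]
    apply PySem.List.foldl_congr_mem'
    intro x _ acc'
    simp only [PySem.Str.pyGet?, PySem.Chars.pyGet?_eq_listPyGet?]
  simp only [hA, innerB_eq]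
  have hv : vowelsA = vowelsB := rfl
  rw [hv]
  split <;> omega

-- ===== VERDICT (by name: the statement is the Claim_ definition above) =====
theorem solve_spec : Claim_equal_solve := by
  intro List_ _
  unfold Spec_solve solve solve_alt
  rw [body_eq]
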